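-- pv_equiv track=rewrite | github.com/code-kanav/clinical-research-agent | src/clinical_research_agent/agents/synthesizer.py | _extract_references_from_text
-- ===== SOURCE A (Python) =====
-- def _extract_references_from_text(text: str) -> list[str]:
--     lines = text.splitlines()
--     refs: list[str] = []
--     in_refs = False
--     for line in lines:
--         stripped = line.strip()
--         if "**References**" in stripped or stripped.startswith("## References"):
--             in_refs = True
--             continue
--         if in_refs and stripped:
--             refs.append(stripped)
--     return refs
-- ===== SOURCE B (Python) =====
-- def _extract_references_from_text(text: str) -> list[str]:
--     lines = text.splitlines()
--
--     def is_marker(line: str) -> bool: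
--         s = line.strip()
--         return "**References**" in s or s.startswith("## References")
--
--     idx = next((i for i, l in enumerate(lines) if is_marker(l)), None)
--     if idx is None:
--         return []
--     return [l.strip() for l in lines[idx + 1:] if not is_marker(l) and l.strip()]
-- ===== Notes on version B (the rewrite author's own statement) =====
-- stated objective: alternative
-- what changed: Replaced the single pass with a running in_refs flag by a locate-then-filter decomposition: find the first marker line with next/enumerate, then build the result by a comprehension over the lines after it, skipping empty and marker lines.
import Mathlib
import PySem

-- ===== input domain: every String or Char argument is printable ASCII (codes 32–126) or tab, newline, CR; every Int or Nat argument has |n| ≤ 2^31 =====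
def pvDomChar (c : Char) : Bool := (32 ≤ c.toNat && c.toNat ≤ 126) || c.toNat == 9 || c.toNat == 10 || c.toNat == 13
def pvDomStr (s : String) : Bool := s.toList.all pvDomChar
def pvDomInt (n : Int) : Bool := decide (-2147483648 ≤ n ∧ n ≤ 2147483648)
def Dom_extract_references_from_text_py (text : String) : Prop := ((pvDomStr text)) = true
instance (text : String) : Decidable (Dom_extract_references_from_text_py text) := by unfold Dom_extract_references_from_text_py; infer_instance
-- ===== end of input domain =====

-- B replaces A's running in_refs-flag pass by a locate-then-filter decomposition (same cost, plainer structure).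

-- ===== PORT A =====
-- single pass over the lines with state (refs, in_refs)
def pvLoopA (st : List String × Bool) (line : String) : List String × Bool :=
  let stripped := PySem.Str.strip line
  if PySem.Str.isIn "**References**" stripped || PySem.Str.startswith stripped "## References" then
    (st.1, true)
  else if st.2 && !(stripped == "") then
    (st.1 ++ [stripped], st.2)
  else
    st

def extract_references_from_text_py (text : String) : List String :=
  ((PySem.Str.splitlines text).foldl pvLoopA ([], false)).1

-- ===== PORT B =====
def pvIsMarker (line : String) : Bool :=
  let s := PySem.Str.strip line
  PySem.Str.isIn "**References**" s || PySem.Str.startswith s "## References"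

def extract_references_from_text_py_alt (text : String) : List String :=
  let lines := PySem.Str.splitlines text
  match lines.findIdx? pvIsMarker with
  | none => []
  | some i =>
      ((lines.drop (i + 1)).filter
        (fun l => !pvIsMarker l && !(PySem.Str.strip l == ""))).map PySem.Str.strip

-- ===== PRECONDITION & SPEC =====
def Spec_extract_references_from_text_py (text : String) (out : List String) : Prop := out = extract_references_from_text_py_alt text
instance (text : String) (out : List String) : Decidable (Spec_extract_references_from_text_py text out) := by unfold Spec_extract_references_from_text_py; infer_instance

-- ===== CLAIM (what is proved, stated in full; the proofs are below) =====
def Claim_equal_extract_references_from_text_py : Prop := ∀ (text : String), Dom_extract_references_from_text_py text → Spec_extract_references_from_text_py text (extract_references_from_text_py text)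

-- ===== LEMMAS AND PROOFS =====

-- A's loop body, phrased through B's marker predicate (definitional)
theorem pvLoopA_eq (st : List String × Bool) (line : String) :
    pvLoopA st line = if pvIsMarker line then (st.1, true)
      else if st.2 && !(PySem.Str.strip line == "") then (st.1 ++ [PySem.Str.strip line], st.2) else st := rfl

theorem pvLoopA_marker (st : List String × Bool) (line : String) (h : pvIsMarker line = true) :
    pvLoopA st line = (st.1, true) := by
  rw [pvLoopA_eq, if_pos h]

theorem pvLoopA_nonmarker_false (acc : List String) (line : String) (h : pvIsMarker line = false) :
    pvLoopA (acc, false) line = (acc, false) := by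
  rw [pvLoopA_eq, if_neg (by simp [h])]
  simp

theorem pvLoopA_true_skip (acc : List String) (line : String) (h : pvIsMarker line = false)
    (he : (PySem.Str.strip line == "") = true) :
    pvLoopA (acc, true) line = (acc, true) := by
  rw [pvLoopA_eq, if_neg (by simp [h]), if_neg (by simp [he])]

theorem pvLoopA_true_take (acc : List String) (line : String) (h : pvIsMarker line = false)
    (he : (PySem.Str.strip line == "") = false) :
    pvLoopA (acc, true) line = (acc ++ [PySem.Str.strip line], true) := by
  rw [pvLoopA_eq, if_neg (by simp [h]), if_pos (by simp [he])]

-- once the flag is true, the loop appends exactly the stripped non-empty non-marker lines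
theorem foldA_true (l : List String) (acc : List String) :
    (l.foldl pvLoopA (acc, true)).1
      = acc ++ (l.filter (fun x => !pvIsMarker x && !(PySem.Str.strip x == ""))).map PySem.Str.strip := by
  induction l generalizing acc with
  | nil => simp
  | cons x xs ih =>
      by_cases hm : pvIsMarker x = true
      · rw [List.foldl_cons, pvLoopA_marker (acc, true) x hm, ih]
        simp [hm]
      · rw [Bool.not_eq_true] at hm
        by_cases he : (PySem.Str.strip x == "") = true
        · rw [List.foldl_cons, pvLoopA_true_skip acc x hm he, ih]
          simp [hm, he]
        · rw [Bool.not_eq_true] at he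
          rw [List.foldl_cons, pvLoopA_true_take acc x hm he, ih]
          simp [hm, he]

-- the whole loop matches B's locate-then-filter form
theorem foldA_eq_alt (l : List String) :
    (l.foldl pvLoopA ([], false)).1
      = match l.findIdx? pvIsMarker with
        | none => []
        | some i => ((l.drop (i + 1)).filter
            (fun x => !pvIsMarker x && !(PySem.Str.strip x == ""))).map PySem.Str.strip := by
  induction l with
  | nil => simp
  | cons x xs ih =>
      by_cases hm : pvIsMarker x = true
      · rw [List.foldl_cons, pvLoopA_marker ([], false) x hm]
        simp [List.findIdx?_cons, hm, foldA_true xs []]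
      · rw [Bool.not_eq_true] at hm
        rw [List.foldl_cons, pvLoopA_nonmarker_false [] x hm, ih]
        simp only [List.findIdx?_cons, hm, Bool.false_eq_true, if_false]
        cases h : List.findIdx? pvIsMarker xs with
        | none => simp
        | some i => simp [List.drop_succ_cons]

-- ===== VERDICT (by name: the statement is the Claim_ definition above) =====
theorem extract_references_from_text_py_spec : Claim_equal_extract_references_from_text_py := by
  intro text _
  unfold Spec_extract_references_from_text_py extract_references_from_text_py extract_references_from_text_py_alt
  exact foldA_eq_alt (PySem.Str.splitlines text)
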